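-- pv_equiv track=rewrite | github.com/2716202178/project_sum | url_feature_extr_python/UrlProcess/Url_Parse.py | _count_directory_max_length
-- ===== SOURCE A (Python) =====
-- def _count_directory_max_length(url_data):
--     directory_max_length = 0
--     directory_length = 0
--     for i in range(0, len(url_data)):
--         if ord(url_data[i]) == 46 or ord(url_data[i]) == 47 or ord(url_data[i]) == 92:
--             directory_length += 1
--             if directory_max_length < directory_length:
--                 directory_max_length = directory_length
--         else:
--             directory_length = 0
--
--     return directory_max_length
-- ===== SOURCE B (Python) =====
-- def _count_directory_max_length(url_data):
--     best = 0
--     i = 0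
--     n = len(url_data)
--     while i < n:
--         if url_data[i] in './\\':
--             j = i
--             while j < n and url_data[j] in './\\':
--                 j += 1
--             best = max(best, j - i)
--             i = j
--         else:
--             i += 1
--     return best
-- ===== Notes on version B (the rewrite author's own statement) =====
-- stated objective: alternative
-- what changed: B extracts each maximal run of './\' characters with an inner scan and takes the max of whole run lengths, instead of A's per-character running counter with an else-reset branch.
import Mathlib
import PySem

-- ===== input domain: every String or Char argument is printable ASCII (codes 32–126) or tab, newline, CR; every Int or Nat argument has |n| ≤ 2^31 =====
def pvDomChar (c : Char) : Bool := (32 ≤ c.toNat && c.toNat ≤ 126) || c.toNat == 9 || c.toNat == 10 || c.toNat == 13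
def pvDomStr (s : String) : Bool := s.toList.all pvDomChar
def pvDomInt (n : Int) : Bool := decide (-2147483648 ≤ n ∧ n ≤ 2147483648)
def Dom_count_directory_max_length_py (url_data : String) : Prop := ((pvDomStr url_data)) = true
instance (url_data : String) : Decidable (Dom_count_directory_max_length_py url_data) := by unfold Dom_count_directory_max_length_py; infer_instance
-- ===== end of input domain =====

-- B extracts whole maximal runs of './\' characters and takes the max of run lengths,
-- instead of A's per-character running counter with an else-reset (alternative decomposition, same cost).

-- ===== PORT A =====
-- A's loop over range(len(url_data)) reading url_data[i] is ported as a fold over the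
-- characters in order; ord(url_data[i]) == k is c.toNat == k.
def count_directory_max_length_py (url_data : String) : Int :=
  (url_data.toList.foldl
    (fun (st : Int × Int) c =>
      if c.toNat == 46 || c.toNat == 47 || c.toNat == 92 then
        let dl := st.2 + 1
        (if st.1 < dl then dl else st.1, dl)
      else (st.1, 0))
    (0, 0)).1

-- ===== PORT B =====
def pvIsSep (c : Char) : Bool := c == '.' || c == '/' || c == '\\'

-- the outer while-loop of B: on a separator, scan the whole run (takeWhile/dropWhile
-- mirror the inner 'while j < n and url_data[j] in ...' scan), record max(best, run length)
def pvAltGo (l : List Char) (best : Int) : Int :=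
  match l with
  | [] => best
  | c :: cs =>
    if pvIsSep c then
      pvAltGo (cs.dropWhile pvIsSep) (max best ((cs.takeWhile pvIsSep).length + 1))
    else pvAltGo cs best
termination_by l.length
decreasing_by
  · simpa using Nat.lt_succ_of_le (List.length_dropWhile_le pvIsSep cs)
  · simp

def count_directory_max_length_py_alt (url_data : String) : Int :=
  pvAltGo url_data.toList 0

-- ===== PRECONDITION & SPEC =====
def Spec_count_directory_max_length_py (url_data : String) (out : Int) : Prop := out = count_directory_max_length_py_alt url_data
instance (url_data : String) (out : Int) : Decidable (Spec_count_directory_max_length_py url_data out) := by unfold Spec_count_directory_max_length_py; infer_instance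

-- ===== CLAIM (what is proved, stated in full; the proofs are below) =====
def Claim_equal_count_directory_max_length_py : Prop := ∀ (url_data : String), Dom_count_directory_max_length_py url_data → Spec_count_directory_max_length_py url_data (count_directory_max_length_py url_data)

-- ===== LEMMAS AND PROOFS =====

-- A's ord-based test agrees with B's character test
lemma sep_eq (c : Char) :
    (c.toNat == 46 || c.toNat == 47 || c.toNat == 92) = pvIsSep c := by
  apply Bool.eq_iff_iff.mpr
  simp only [pvIsSep, Bool.or_eq_true, beq_iff_eq, Char.ext_iff, ← UInt32.toNat_inj, Char.toNat,
    show ('.').val.toNat = 46 from rfl, show ('/').val.toNat = 47 from rfl,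
    show ('\\').val.toNat = 92 from rfl]

-- A's loop body, with the condition rewritten through sep_eq
def pvStep (st : Int × Int) (c : Char) : Int × Int :=
  if pvIsSep c then
    (if st.1 < st.2 + 1 then st.2 + 1 else st.1, st.2 + 1)
  else (st.1, 0)

-- "continuation max": the largest value A's running counter reaches, starting from cur
def contMax (cur : Int) : List Char → Int
  | [] => cur
  | c :: cs => if pvIsSep c then contMax (cur + 1) cs else max cur (contMax 0 cs)

lemma contMax_ge (l : List Char) : ∀ cur, cur ≤ contMax cur l := by
  induction l with
  | nil => intro cur; simp [contMax]
  | cons c cs ih =>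
    intro cur
    simp only [contMax]
    split
    · exact le_trans (by omega) (ih (cur + 1))
    · exact le_max_left _ _

lemma foldA_eq_contMax (l : List Char) : ∀ (m cur : Int), 0 ≤ cur → cur ≤ m →
    (l.foldl pvStep (m, cur)).1 = max m (contMax cur l) := by
  induction l with
  | nil => intro m cur h0 hm; simp [contMax]; omega
  | cons c cs ih =>
    intro m cur h0 hm
    rw [List.foldl_cons]
    by_cases h : pvIsSep c
    · rw [show pvStep (m, cur) c = (if m < cur + 1 then cur + 1 else m, cur + 1) by
        simp [pvStep, h]]
      rw [ih (if m < cur + 1 then cur + 1 else m) (cur + 1) (by omega) (by split <;> omega)]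
      have := contMax_ge cs (cur + 1)
      simp only [contMax, if_pos h]
      split <;> omega
    · rw [show pvStep (m, cur) c = (m, 0) by simp [pvStep, h]]
      rw [ih m 0 le_rfl (by omega)]
      simp only [contMax, if_neg h]
      omega

lemma contMax_run : ∀ (run rest : List Char) (cur : Int), (∀ c ∈ run, pvIsSep c) →
    contMax cur (run ++ rest) = contMax (cur + run.length) rest := by
  intro run
  induction run with
  | nil => intro rest cur _; simp
  | cons c cs ih =>
    intro rest cur h
    have hc : pvIsSep c := h c (by simp)
    simp only [List.cons_append, contMax, if_pos hc]
    rw [ih rest (cur + 1) (fun d hd => h d (by simp [hd]))]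
    congr 1
    simp only [List.length_cons]
    push_cast
    ring

lemma head_dropWhile_false (p : Char → Bool) :
    ∀ (l : List Char) (e : Char) (es : List Char), l.dropWhile p = e :: es → ¬ p e := by
  intro l
  induction l with
  | nil => intro e es h; simp at h
  | cons c cs ih =>
    intro e es h
    rw [List.dropWhile_cons] at h
    by_cases hc : p c
    · exact ih e es (by simpa [hc] using h)
    · rw [if_neg hc] at h
      obtain ⟨rfl, _⟩ := List.cons.inj h
      exact hc

lemma altGo_eq_contMax : ∀ (n : ℕ) (l : List Char), l.length ≤ n → ∀ best : Int, 0 ≤ best →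
    pvAltGo l best = max best (contMax 0 l) := by
  intro n
  induction n with
  | zero =>
    intro l hl best hb
    have : l = [] := List.eq_nil_of_length_eq_zero (Nat.le_zero.mp hl)
    subst this; simp [pvAltGo, contMax]; omega
  | succ n ih =>
    intro l hl best hb
    match l with
    | [] => simp [pvAltGo, contMax]; omega
    | c :: cs =>
      have hcs : cs.length ≤ n := by simpa using Nat.lt_succ_iff.mp (by simpa using hl)
      rw [pvAltGo]
      by_cases h : pvIsSep c
      · rw [if_pos h]
        have hrun : contMax 0 (c :: cs)
            = contMax (((cs.takeWhile pvIsSep).length : Int) + 1) (cs.dropWhile pvIsSep) := by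
          conv_lhs => rw [show (c :: cs) = c :: (cs.takeWhile pvIsSep ++ cs.dropWhile pvIsSep) by
            rw [List.takeWhile_append_dropWhile]]
          simp only [contMax, if_pos h]
          rw [contMax_run (cs.takeWhile pvIsSep) (cs.dropWhile pvIsSep) (0 + 1)
            (fun d hd => List.mem_takeWhile_imp hd)]
          congr 1
          ring
        rw [ih (cs.dropWhile pvIsSep)
            (le_trans (List.length_dropWhile_le pvIsSep cs) hcs)
            (max best ((cs.takeWhile pvIsSep).length + 1)) (le_trans hb (le_max_left _ _))]
        rw [hrun]
        rcases hd : cs.dropWhile pvIsSep with _ | ⟨e, es⟩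
        · simp [contMax]; omega
        · have he : ¬ pvIsSep e := head_dropWhile_false pvIsSep cs e es hd
          simp only [contMax, if_neg he]
          have h2 := contMax_ge es (0 : Int)
          have h1 : (0:Int) ≤ ((cs.takeWhile pvIsSep).length : Int) := by positivity
          omega
      · rw [if_neg h]
        rw [ih cs hcs best hb]
        simp only [contMax, if_neg h]
        have := contMax_ge cs (0 : Int)
        omega

-- ===== VERDICT (by name: the statement is the Claim_ definition above) =====
theorem count_directory_max_length_py_spec : Claim_equal_count_directory_max_length_py := by
  intro url_data _
  unfold Spec_count_directory_max_length_py count_directory_max_length_py count_directory_max_length_py_alt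
  have hf : (fun (st : Int × Int) c =>
      if c.toNat == 46 || c.toNat == 47 || c.toNat == 92 then
        let dl := st.2 + 1
        (if st.1 < dl then dl else st.1, dl)
      else (st.1, 0)) = pvStep := by
    funext st c
    rw [pvStep, sep_eq]
  rw [hf, foldA_eq_contMax url_data.toList 0 0 le_rfl le_rfl,
      altGo_eq_contMax url_data.toList.length url_data.toList le_rfl 0 le_rfl]
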